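-- pv_equiv track=rewrite | github.com/matiscodjia/DataSphere | Theory/Algorithms/PGI.py | pgi
-- ===== SOURCE A (Python) =====
-- def pgi(A):
--     if len(A) == 1:
--         return 0
--     else:
--         i = A[len(A)-1]
--         r = pgi(A[:-1])  # Updated line
--         j = A[r]
--         if i > j:
--             return len(A) - 1
--         else:
--             return r
-- ===== SOURCE B (Python) =====
-- def pgi(A):
--     best = 0
--     for k in range(1, len(A)):
--         if A[k] > A[best]:
--             best = k
--     return best
-- ===== Notes on version B (the rewrite author's own statement) =====
-- stated objective: faster
-- what changed: Replaced the recursion that slices a fresh copy of the list at every level (A[:-1]) with a single linear scan tracking the index of the current maximum with strict-greater update.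
import Mathlib
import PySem

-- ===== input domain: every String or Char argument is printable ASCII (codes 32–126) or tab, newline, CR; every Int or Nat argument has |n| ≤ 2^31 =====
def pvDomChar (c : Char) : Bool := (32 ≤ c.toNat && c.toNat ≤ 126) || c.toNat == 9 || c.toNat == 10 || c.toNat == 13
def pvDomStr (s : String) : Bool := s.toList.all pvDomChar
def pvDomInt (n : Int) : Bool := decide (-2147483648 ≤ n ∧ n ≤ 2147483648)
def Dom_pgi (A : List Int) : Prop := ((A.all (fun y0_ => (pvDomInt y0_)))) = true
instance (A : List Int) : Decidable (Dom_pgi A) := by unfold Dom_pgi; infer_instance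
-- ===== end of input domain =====

-- B replaces A's recursion over list slices (quadratic from copying A[:-1] each level)
-- with one linear scan keeping the index of the maximum; equivalence of return values only.

-- ===== PORT A =====
-- A[:-1] is ported as List.dropLast (exact for every list, including []).
def pgi (A : List Int) : Int :=
  if A.length = 1 then 0
  else if h0 : A = [] then 0  -- Python raises IndexError here (A[len(A)-1] on []); excluded by Pre_pgi
  else
    let i := PySem.List.pyGetD A ((A.length : Int) - 1) 0
    let r := pgi A.dropLast
    let j := PySem.List.pyGetD A r 0
    if i > j then (A.length : Int) - 1 else r
termination_by A.length
decreasing_by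
  have hpos : 0 < A.length := List.length_pos_of_ne_nil h0
  simp only [List.length_dropLast]
  omega

-- ===== PORT B =====
def pgi_alt (A : List Int) : Int :=
  (PySem.List.pyRange 1 (A.length : Int) 1).foldl
    (fun best k =>
      if PySem.List.pyGetD A k 0 > PySem.List.pyGetD A best 0 then k else best) 0

-- ===== PRECONDITION & SPEC =====
def Pre_pgi (A : List Int) : Prop := A ≠ []
instance (A : List Int) : Decidable (Pre_pgi A) := by unfold Pre_pgi; infer_instance
def pvWitness_pgi : List Int := ([3, 1, 4])

def Spec_pgi (A : List Int) (out : Int) : Prop := out = pgi_alt A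
instance (A : List Int) (out : Int) : Decidable (Spec_pgi A out) := by unfold Spec_pgi; infer_instance

-- ===== CLAIM (what is proved, stated in full; the proofs are below) =====
def Claim_equal_pgi : Prop := ∀ (A : List Int), Dom_pgi A → Pre_pgi A → Spec_pgi A (pgi A)

-- ===== LEMMAS AND PROOFS =====

-- the loop body of B, parameterised by the list it indexes
def pvStep (A : List Int) (best k : Int) : Int :=
  if PySem.List.pyGetD A k 0 > PySem.List.pyGetD A best 0 then k else best

theorem pgi_alt_eq_foldl (A : List Int) :
    pgi_alt A = (PySem.List.pyRange 1 (A.length : Int) 1).foldl (pvStep A) 0 := rfl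

-- pyGetD agrees on A and A.dropLast at in-range indices
theorem pvGetD_dropLast (A : List Int) (k : Int)
    (h0 : 0 ≤ k) (h : k < (A.dropLast.length : Int)) :
    PySem.List.pyGetD A k 0 = PySem.List.pyGetD A.dropLast k 0 := by
  have hlen : A.dropLast.length ≤ A.length := by
    simp [List.length_dropLast]
  rw [PySem.List.pyGetD_eq_getElem A 0 h0 (by omega),
      PySem.List.pyGetD_eq_getElem A.dropLast 0 h0 h]
  rw [List.getElem_dropLast]

-- the scan over indices < |A.dropLast| computes the same on A and on A.dropLast
theorem pvFold_dropLast (A : List Int) :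
    ∀ (l : List Int) (init : Int),
      (0 ≤ init ∧ init < (A.dropLast.length : Int)) →
      (∀ k ∈ l, 0 ≤ k ∧ k < (A.dropLast.length : Int)) →
      l.foldl (pvStep A) init = l.foldl (pvStep A.dropLast) init := by
  intro l
  induction l with
  | nil => intro init _ _; rfl
  | cons x xs ih =>
      intro init hinit hl
      have hx := hl x (by simp)
      simp only [List.foldl_cons]
      have hstep : pvStep A init x = pvStep A.dropLast init x := by
        unfold pvStep
        rw [pvGetD_dropLast A x hx.1 hx.2, pvGetD_dropLast A init hinit.1 hinit.2]
      rw [hstep]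
      apply ih
      · unfold pvStep
        split
        · exact hx
        · exact hinit
      · intro k hk; exact hl k (List.mem_cons_of_mem _ hk)

theorem pgi_eq_alt : ∀ (n : ℕ) (A : List Int), A.length = n → A ≠ [] → pgi A = pgi_alt A := by
  intro n
  induction n using Nat.strong_induction_on with
  | _ n ih =>
    intro A hlen hne
    by_cases h1 : A.length = 1
    · rw [pgi.eq_def, if_pos h1, pgi_alt_eq_foldl, h1]
      simp [PySem.List.pyRange_one_eq_nil]
    · -- length ≥ 2
      have h2 : 2 ≤ A.length := by
        have := List.length_pos_of_ne_nil hne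
        omega
      have hdne : A.dropLast ≠ [] := by
        intro hd
        have := congrArg List.length hd
        simp [List.length_dropLast] at this
        omega
      have hdlen : (A.dropLast.length : Int) = (A.length : Int) - 1 := by
        simp [List.length_dropLast]; omega
      have hr := ih A.dropLast.length (by simp [List.length_dropLast]; omega)
        A.dropLast rfl hdne
      rw [pgi.eq_def, if_neg h1, dif_neg hne]
      -- split the range of B's fold at |A| - 1
      rw [pgi_alt_eq_foldl,
          PySem.List.pyRange_one_append 1 ((A.length : Int) - 1) (A.length : Int)
            (by omega) (by omega),
          List.foldl_append]
      have hmem : ∀ k ∈ PySem.List.pyRange 1 ((A.length : Int) - 1) 1,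
          0 ≤ k ∧ k < (A.dropLast.length : Int) := by
        intro k hk
        rw [PySem.List.mem_pyRange_one] at hk
        constructor <;> omega
      rw [pvFold_dropLast A _ 0 (by constructor <;> omega) hmem]
      have hlast : PySem.List.pyRange ((A.length : Int) - 1) (A.length : Int) 1
          = [(A.length : Int) - 1] := by
        have := PySem.List.pyRange_one_singleton ((A.length : Int) - 1)
        simpa using this
      rw [hlast]
      have hfold : (PySem.List.pyRange 1 ((A.length : Int) - 1) 1).foldl
          (pvStep A.dropLast) 0 = pgi A.dropLast := by
        rw [hr, pgi_alt_eq_foldl, hdlen]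
      simp only [List.foldl_cons, List.foldl_nil]
      rw [hfold]
      unfold pvStep
      split <;> rfl

-- ===== VERDICT (by name: the statement is the Claim_ definition above) =====
theorem pgi_spec : Claim_equal_pgi := by
  intro A _ hpre
  unfold Spec_pgi
  exact pgi_eq_alt A.length A rfl hpre
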